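-- pv_equiv track=rewrite | github.com/lbraby/AoC2024 | solutions/day18/solvers.py | run_dijkstras
-- ===== SOURCE A (Python) =====
-- import heapq
--
-- def find_path(visited):
--     path = [(70, 70)]
--
--     node = (70, 70)
--     while True:
--         node = visited[node]
--         path.append(node)
--         if node == (0, 0):
--             break
--
--     return path[::-1]
--
-- def run_dijkstras(bytes, blocks_fallen):
--     frontier = []
--     visited = {}
--     barriers = set(bytes[:blocks_fallen])
--
--     heapq.heappush(frontier, (0, (0, 0), (0, 0)))
--     while frontier:
--         distance, target, source = heapq.heappop(frontier)
--
--         if target in visited: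
--             continue
--
--         visited[target] = source
--         if target == (70, 70):
--             return distance, find_path(visited)
--
--         for dx, dy in [(0, 1), (0, -1), (1, 0), (-1, 0)]:
--             neighbor = (target[0] + dx, target[1] + dy)
--             if neighbor[0] < 0 or neighbor[0] > 70 or neighbor[1] < 0 or neighbor[1] > 70 or neighbor in barriers:
--                 continue
--
--             heapq.heappush(frontier, (
--                 distance + 1, neighbor, target
--             ))
--
--     return None, None
-- ===== SOURCE B (Python) =====
-- def find_path(visited):
--     path = [(70, 70)]
--
--     node = (70, 70)
--     while True:
--         node = visited[node]
--         path.append(node)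
--         if node == (0, 0):
--             break
--
--     return path[::-1]
--
-- def run_dijkstras(bytes, blocks_fallen):
--     # Level-synchronous BFS (all edges have weight 1, so no heap is needed).
--     # Each level's candidate edges are processed in sorted order, which gives
--     # the same deterministic parent choice as the heap's (distance, target,
--     # source) tie-break.
--     barriers = set(bytes[:blocks_fallen])
--     visited = {}
--     frontier = [((0, 0), (0, 0))]   # (target, source) edges of the current level
--     dist = 0
--     while frontier:
--         next_frontier = []
--         for target, source in sorted(frontier):
--             if target in visited:
--                 continue
--             visited[target] = source
--             if target == (70, 70):
--                 return dist, find_path(visited)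
--             for dx, dy in [(0, 1), (0, -1), (1, 0), (-1, 0)]:
--                 neighbor = (target[0] + dx, target[1] + dy)
--                 if neighbor[0] < 0 or neighbor[0] > 70 or neighbor[1] < 0 or neighbor[1] > 70 or neighbor in barriers:
--                     continue
--                 next_frontier.append((neighbor, target))
--         frontier = next_frontier
--         dist += 1
--     return None, None
-- ===== Notes on version B (the rewrite author's own statement) =====
-- stated objective: alternative
-- what changed: Replaces heap-based Dijkstra by a level-synchronous BFS (unit edge weights): each level's (target, source) edges are collected in a list and processed in sorted order, which reproduces the heap's (distance, target, source) tie-break and hence the exact recorded parents and path.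
import Mathlib
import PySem

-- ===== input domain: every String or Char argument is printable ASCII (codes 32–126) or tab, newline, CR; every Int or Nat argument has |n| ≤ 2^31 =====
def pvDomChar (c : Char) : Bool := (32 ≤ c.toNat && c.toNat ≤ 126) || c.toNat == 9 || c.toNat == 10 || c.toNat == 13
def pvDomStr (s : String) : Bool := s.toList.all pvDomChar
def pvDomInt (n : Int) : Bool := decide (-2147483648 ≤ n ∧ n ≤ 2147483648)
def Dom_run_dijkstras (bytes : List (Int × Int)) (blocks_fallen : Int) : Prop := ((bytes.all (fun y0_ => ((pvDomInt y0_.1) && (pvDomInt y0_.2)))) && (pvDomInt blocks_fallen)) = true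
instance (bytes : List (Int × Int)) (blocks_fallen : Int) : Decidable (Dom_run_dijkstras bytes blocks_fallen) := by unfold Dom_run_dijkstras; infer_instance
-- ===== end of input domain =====

-- B replaces heap-based Dijkstra by a level-synchronous BFS whose levels are processed in
-- sorted order (same tie-break as the heap, hence the same distance, parents and path).


-- shared helper: the inner `for dx, dy in [...]` neighbour loop, identical in both Pythons
-- (in-bounds, non-barrier neighbours of t, in direction order)
def pvNbrs (barriers : PySem.Set (Int × Int)) (t : Int × Int) : List (Int × Int) :=
  [((0:Int), (1:Int)), (0, -1), (1, 0), (-1, 0)].foldl (fun acc dxy =>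
    let n := (t.1 + dxy.1, t.2 + dxy.2)
    if n.1 < 0 || n.1 > 70 || n.2 < 0 || n.2 > 70 || PySem.Set.contains barriers n then acc
    else acc ++ [n]) []

-- the visited dict is used only via `in`, `[k] = v` and `[k]` and is never iterated, so its
-- insertion order is unobservable: it is ported as Std.HashMap (constant-time lookups, as in
-- CPython); every other dict/set/list built-in goes through PySem.

-- shared helper: find_path (identical in both Pythons); Python appends and finally reverses
-- (`path[::-1]`), ported as the equivalent cons-accumulation which builds the reversed list
-- directly.  fuel only makes the while-loop total; the `none` lookup case is Python's
-- KeyError, unreachable for the parent dicts either program builds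
def pvFindPath (fuel : Nat) (visited : Std.HashMap (Int × Int) (Int × Int))
    (path : List (Int × Int)) (node : Int × Int) : List (Int × Int) :=
  match fuel with
  | 0 => path
  | f + 1 =>
    match visited.get? node with
    | none => path
    | some n =>
      let path := n :: path
      if n = ((0:Int), (0:Int)) then path else pvFindPath f visited path n

-- ===== PORT A =====
-- Python's `heapq` is not in PySem: the heap is ported by hand as a plain list whose observable
-- behaviour is exact — heappush appends (cons), heappop removes the minimum entry under Python's
-- lexicographic tuple order (first occurrence; equal heap entries never occur in this program)
def pvEntLe (a b : Int × (Int × Int) × (Int × Int)) : Bool :=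
  a.1 < b.1 || (a.1 == b.1 && (a.2.1.1 < b.2.1.1 || (a.2.1.1 == b.2.1.1 &&
    (a.2.1.2 < b.2.1.2 || (a.2.1.2 == b.2.1.2 && (a.2.2.1 < b.2.2.1 || (a.2.2.1 == b.2.2.1 &&
      (a.2.2.2 < b.2.2.2 || a.2.2.2 == b.2.2.2))))))))

def pvHeapPop (l : List (Int × (Int × Int) × (Int × Int))) :
    Option ((Int × (Int × Int) × (Int × Int)) × List (Int × (Int × Int) × (Int × Int))) :=
  match l with
  | [] => none
  | x :: xs =>
    let m := xs.foldl (fun m y => if pvEntLe m y then m else y) x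
    some (m, (x :: xs).erase m)

-- the `while frontier:` loop of A; fuel only makes it total (5041 cells, ≤ 4·5041+1 pushes)
def pvALoop (fuel : Nat) (frontier : List (Int × (Int × Int) × (Int × Int)))
    (visited : Std.HashMap (Int × Int) (Int × Int)) (barriers : PySem.Set (Int × Int)) :
    Option (Option Int × (Option (List (Int × Int)))) :=
  match fuel with
  | 0 => none
  | f + 1 =>
    match pvHeapPop frontier with
    | none => some (none, none)
    | some ((distance, target, source), rest) =>
      if visited.contains target then pvALoop f rest visited barriers
      else
        let visited := visited.insert target source
        if target = ((70:Int), (70:Int)) then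
          some (some distance, some (pvFindPath 6000 visited [((70:Int), (70:Int))] ((70:Int), (70:Int))))
        else
          pvALoop f ((pvNbrs barriers target).foldl
            (fun fr n => (distance + 1, n, target) :: fr) rest) visited barriers

def run_dijkstras (bytes : List (Int × Int)) (blocks_fallen : Int) :
    Option Int × (Option (List (Int × Int))) :=
  let barriers := PySem.Set.ofList (PySem.List.slice bytes none (some blocks_fallen))
  (pvALoop 100000 [((0:Int), ((0:Int), (0:Int)), ((0:Int), (0:Int)))] (Std.HashMap.emptyWithCapacity : Std.HashMap (Int × Int) (Int × Int)) barriers).getD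
    (none, none)

-- ===== PORT B =====
-- Python's `sorted(frontier)` compares (target, source) tuples lexicographically; ported as a
-- stable mergesort under an integer key encoding that order — exact because every coordinate in
-- any frontier lies in [0, 70] (the start (0,0) and bounds-checked pushes only)
def pvEdgeKey (e : (Int × Int) × (Int × Int)) : Int :=
  ((e.1.1 * 71 + e.1.2) * 71 + e.2.1) * 71 + e.2.2

def pvEdgeLe (a b : (Int × Int) × (Int × Int)) : Bool := pvEdgeKey a ≤ pvEdgeKey b

-- the `for target, source in sorted(frontier):` loop of B: inl = early return at (70,70),
-- inr = (visited, next_frontier) at the end of the level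
def pvBInner : List ((Int × Int) × (Int × Int)) → Std.HashMap (Int × Int) (Int × Int) →
    List ((Int × Int) × (Int × Int)) → Int → PySem.Set (Int × Int) →
    (Option Int × (Option (List (Int × Int)))) ⊕
      (Std.HashMap (Int × Int) (Int × Int) × List ((Int × Int) × (Int × Int)))
  | [], visited, nxt, _, _ => .inr (visited, nxt)
  | (target, source) :: rest, visited, nxt, dist, barriers =>
    if visited.contains target then pvBInner rest visited nxt dist barriers
    else
      let visited := visited.insert target source
      if target = ((70:Int), (70:Int)) then
        .inl (some dist, some (pvFindPath 6000 visited [((70:Int), (70:Int))] ((70:Int), (70:Int))))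
      else
        pvBInner rest visited (nxt ++ (pvNbrs barriers target).map (fun n => (n, target))) dist barriers

-- the `while frontier:` loop of B; fuel only makes it total (≤ 5042 levels)
def pvBLoop (fuel : Nat) (frontier : List ((Int × Int) × (Int × Int)))
    (visited : Std.HashMap (Int × Int) (Int × Int)) (dist : Int) (barriers : PySem.Set (Int × Int)) :
    Option Int × (Option (List (Int × Int))) :=
  match fuel with
  | 0 => (none, none)
  | f + 1 =>
    if frontier.isEmpty then (none, none)
    else
      match pvBInner (frontier.mergeSort pvEdgeLe) visited [] dist barriers with
      | .inl r => r
      | .inr (visited, nxt) => pvBLoop f nxt visited (dist + 1) barriers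

def run_dijkstras_alt (bytes : List (Int × Int)) (blocks_fallen : Int) :
    Option Int × (Option (List (Int × Int))) :=
  let barriers := PySem.Set.ofList (PySem.List.slice bytes none (some blocks_fallen))
  pvBLoop 6000 [(((0:Int), (0:Int)), ((0:Int), (0:Int)))] (Std.HashMap.emptyWithCapacity : Std.HashMap (Int × Int) (Int × Int)) 0 barriers

-- ===== PRECONDITION & SPEC =====
def Spec_run_dijkstras (bytes : List (Int × Int)) (blocks_fallen : Int) (out : Option Int × (Option (List (Int × Int)))) : Prop := out = run_dijkstras_alt bytes blocks_fallen
instance (bytes : List (Int × Int)) (blocks_fallen : Int) (out : Option Int × (Option (List (Int × Int)))) : Decidable (Spec_run_dijkstras bytes blocks_fallen out) := by unfold Spec_run_dijkstras; infer_instance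

-- ===== CLAIM (what is proved, stated in full; the proofs are below) =====
def Claim_equal_run_dijkstras : Prop := ∀ (bytes : List (Int × Int)) (blocks_fallen : Int), Dom_run_dijkstras bytes blocks_fallen → Spec_run_dijkstras bytes blocks_fallen (run_dijkstras bytes blocks_fallen)

-- ===== LEMMAS AND PROOFS =====

-- abbreviations used only by the proofs
def pvInGrid (c : Int × Int) : Prop := 0 ≤ c.1 ∧ c.1 ≤ 70 ∧ 0 ≤ c.2 ∧ c.2 ≤ 70

def pvGrid : List (Int × Int) :=
  (PySem.List.pyRange 0 71 1).flatMap (fun x => (PySem.List.pyRange 0 71 1).map (fun y => (x, y)))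

def pvUnvis (v : Std.HashMap (Int × Int) (Int × Int)) : Nat :=
  (pvGrid.filter (fun c => ! v.contains c)).length

-- B's computation from the middle of a level: pending = unprocessed part of the sorted level,
-- nxt = next level's edges accumulated so far
def pvBCont (pending : List ((Int × Int) × (Int × Int)))
    (visited : Std.HashMap (Int × Int) (Int × Int)) (nxt : List ((Int × Int) × (Int × Int)))
    (d : Int) (fB : Nat) (barriers : PySem.Set (Int × Int)) :
    Option Int × (Option (List (Int × Int))) :=
  match pvBInner pending visited nxt d barriers with
  | .inl r => r
  | .inr (v, n2) => pvBLoop fB n2 v (d + 1) barriers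

-- basic facts about the hand-ported heap order
theorem pvEntLe_refl (a : Int × (Int × Int) × (Int × Int)) : pvEntLe a a = true := by
  simp [pvEntLe]

theorem pvEntLe_total (a b : Int × (Int × Int) × (Int × Int)) :
    pvEntLe a b = false → pvEntLe b a = true := by
  simp [pvEntLe]; omega

theorem pvEntLe_trans {a b c : Int × (Int × Int) × (Int × Int)}
    (h1 : pvEntLe a b = true) (h2 : pvEntLe b c = true) : pvEntLe a c = true := by
  simp [pvEntLe] at *; omega

theorem pvEntLe_antisymm {a b : Int × (Int × Int) × (Int × Int)}
    (h1 : pvEntLe a b = true) (h2 : pvEntLe b a = true) : a = b := by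
  obtain ⟨d1, ⟨t1, t2⟩, s1, s2⟩ := a
  obtain ⟨e1, ⟨u1, u2⟩, r1, r2⟩ := b
  simp [pvEntLe] at *; omega

theorem pvEntLe_dlt {d1 d2 : Int} (h : d1 < d2) (e1 e2 : (Int × Int) × (Int × Int)) :
    pvEntLe (d1, e1) (d2, e2) = true := by
  simp [pvEntLe]; omega

theorem pvKey_lt_entLe {e1 e2 : (Int × Int) × (Int × Int)}
    (hg1 : pvInGrid e1.1 ∧ pvInGrid e1.2) (hg2 : pvInGrid e2.1 ∧ pvInGrid e2.2)
    (hk : pvEdgeKey e1 < pvEdgeKey e2) (d : Int) : pvEntLe (d, e1) (d, e2) = true := by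
  obtain ⟨⟨t1, t2⟩, s1, s2⟩ := e1
  obtain ⟨⟨u1, u2⟩, r1, r2⟩ := e2
  simp [pvEdgeKey] at hk
  simp [pvEntLe, pvInGrid] at *
  omega

theorem pvKey_inj {e1 e2 : (Int × Int) × (Int × Int)}
    (hg1 : pvInGrid e1.1 ∧ pvInGrid e1.2) (hg2 : pvInGrid e2.1 ∧ pvInGrid e2.2)
    (hk : pvEdgeKey e1 = pvEdgeKey e2) : e1 = e2 := by
  obtain ⟨⟨t1, t2⟩, s1, s2⟩ := e1
  obtain ⟨⟨u1, u2⟩, r1, r2⟩ := e2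
  simp [pvEdgeKey] at hk
  simp [pvInGrid] at *
  omega

-- the hand-ported heappop: returns the minimum entry and the rest (as a multiset)
theorem pvHeapPop_eq_none_iff {l : List (Int × (Int × Int) × (Int × Int))} :
    pvHeapPop l = none ↔ l = [] := by
  cases l <;> simp [pvHeapPop]

theorem pvFoldlMin_spec (xs : List (Int × (Int × Int) × (Int × Int)))
    (x : Int × (Int × Int) × (Int × Int)) :
    (xs.foldl (fun m y => if pvEntLe m y then m else y) x) ∈ x :: xs ∧
      ∀ y ∈ x :: xs, pvEntLe (xs.foldl (fun m y => if pvEntLe m y then m else y) x) y = true := by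
  induction xs generalizing x with
  | nil =>
    refine ⟨by simp, ?_⟩
    intro y hy
    rcases List.mem_cons.mp hy with rfl | hy
    · exact pvEntLe_refl _
    · exact absurd hy (by simp)
  | cons z zs ih =>
    obtain ⟨hmem, hmin⟩ := ih (if pvEntLe x z then x else z)
    simp only [List.foldl_cons]
    constructor
    · by_cases hxz : pvEntLe x z = true
      · rw [if_pos hxz] at hmem ⊢
        rcases List.mem_cons.mp hmem with hm | hm <;> simp [hm]
      · rw [if_neg hxz] at hmem ⊢
        rcases List.mem_cons.mp hmem with hm | hm <;> simp [hm]
    · intro y hy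
      have hacc : pvEntLe (zs.foldl (fun m y => if pvEntLe m y then m else y)
          (if pvEntLe x z then x else z)) (if pvEntLe x z then x else z) = true :=
        hmin _ (List.mem_cons_self ..)
      have hax : pvEntLe (if pvEntLe x z then x else z) x = true := by
        by_cases hxz : pvEntLe x z = true <;> simp [hxz, pvEntLe_refl]
        exact pvEntLe_total _ _ (by simpa using hxz)
      have haz : pvEntLe (if pvEntLe x z then x else z) z = true := by
        by_cases hxz : pvEntLe x z = true <;> simp [hxz, pvEntLe_refl]
      rcases List.mem_cons.mp hy with rfl | hy
      · exact pvEntLe_trans hacc hax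
      rcases List.mem_cons.mp hy with rfl | hy
      · exact pvEntLe_trans hacc haz
      · exact hmin _ (List.mem_cons_of_mem _ hy)

theorem pvHeapPop_spec {l : List (Int × (Int × Int) × (Int × Int))}
    {m : Int × (Int × Int) × (Int × Int)} {r : List (Int × (Int × Int) × (Int × Int))}
    (h : pvHeapPop l = some (m, r)) :
    (∀ y ∈ l, pvEntLe m y = true) ∧ (l : Multiset (Int × (Int × Int) × (Int × Int))) = m ::ₘ (r : Multiset _) ∧ r.length + 1 = l.length := by
  match l with
  | [] => simp [pvHeapPop] at h
  | x :: xs =>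
    simp only [pvHeapPop, Option.some.injEq, Prod.mk.injEq] at h
    obtain ⟨hm, hr⟩ := h
    obtain ⟨hmem, hmin⟩ := pvFoldlMin_spec xs x
    rw [hm] at hmem hmin hr
    subst hr
    refine ⟨hmin, ?_, ?_⟩
    · have hperm : List.Perm (x :: xs) (m :: (x :: xs).erase m) := List.perm_cons_erase hmem
      have h1 := Multiset.coe_eq_coe.mpr hperm
      rw [h1]
      simp
    · have := List.length_erase_of_mem hmem
      simp only [this, List.length_cons]
      omega

-- neighbours: in the grid, pairwise distinct, at most four
theorem pvNbrs_mem_grid {b : PySem.Set (Int × Int)} {t c : Int × Int}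
    (h : c ∈ pvNbrs b t) : pvInGrid c := by
  obtain ⟨t1, t2⟩ := t
  simp only [pvNbrs, List.foldl] at h
  split_ifs at h <;>
    simp_all [pvInGrid, Bool.or_eq_true, decide_eq_true_eq, Prod.ext_iff] <;> omega

theorem pvNbrs_nodup (b : PySem.Set (Int × Int)) (t : Int × Int) : (pvNbrs b t).Nodup := by
  obtain ⟨t1, t2⟩ := t
  simp only [pvNbrs, List.foldl]
  split_ifs <;> simp [Prod.ext_iff]

theorem pvNbrs_length_le (b : PySem.Set (Int × Int)) (t : Int × Int) :
    (pvNbrs b t).length ≤ 4 := by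
  simp only [pvNbrs, List.foldl]
  split_ifs <;> simp

-- the sorted level is strictly increasing under the (grid-exact) integer key
theorem pvSorted_pairwise_lt {nxt : List ((Int × Int) × (Int × Int))} (hnd : nxt.Nodup)
    (hg : ∀ e ∈ nxt, pvInGrid e.1 ∧ pvInGrid e.2) :
    (nxt.mergeSort pvEdgeLe).Pairwise (fun a b => pvEdgeKey a < pvEdgeKey b) := by
  have hperm : (nxt.mergeSort pvEdgeLe).Perm nxt := List.mergeSort_perm nxt pvEdgeLe
  have hnd' : (nxt.mergeSort pvEdgeLe).Nodup := hperm.nodup_iff.mpr hnd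
  have hle : (nxt.mergeSort pvEdgeLe).Pairwise (fun a b => pvEdgeKey a ≤ pvEdgeKey b) := by
    have hp := List.pairwise_mergeSort (le := pvEdgeLe)
      (fun a b c h1 h2 => by simp [pvEdgeLe] at *; omega)
      (fun a b => by simp [pvEdgeLe]; omega) nxt
    exact hp.imp (fun h => by simpa [pvEdgeLe] using h)
  have hand := hle.and hnd'
  refine hand.imp_of_mem ?_
  intro a b ha hb hab
  rcases hab with ⟨hle1, hne⟩
  rcases lt_or_eq_of_le hle1 with h | h
  · exact h
  · exact absurd (pvKey_inj (hg a (hperm.mem_iff.mp ha)) (hg b (hperm.mem_iff.mp hb)) h) hne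

-- the unvisited-cell counter
theorem pvMem_grid {c : Int × Int} : c ∈ pvGrid ↔ pvInGrid c := by
  obtain ⟨x, y⟩ := c
  simp only [pvGrid, List.mem_flatMap, List.mem_map, PySem.List.mem_pyRange_one, pvInGrid]
  constructor
  · rintro ⟨a, ha, b, hb, hab⟩
    injection hab with h1 h2
    subst h1; subst h2
    omega
  · rintro ⟨h1, h2, h3, h4⟩
    exact ⟨x, by omega, y, by omega, rfl⟩

set_option maxRecDepth 100000 in
theorem pvGrid_length : pvGrid.length = 5041 := by decide

theorem pvUnvis_le (v : Std.HashMap (Int × Int) (Int × Int)) : pvUnvis v ≤ 5041 := by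
  have h := List.length_filter_le (fun c => ! v.contains c) pvGrid
  have h2 := pvGrid_length
  unfold pvUnvis
  omega

theorem pvFilter_length_mono {α : Type} (l : List α) (p q : α → Bool)
    (himp : ∀ a, q a = true → p a = true) : (l.filter q).length ≤ (l.filter p).length := by
  induction l with
  | nil => simp
  | cons x xs ih =>
    by_cases hq : q x = true
    · simp [hq, himp x hq]; omega
    · have : q x = false := by simpa using hq
      by_cases hp : p x = true <;> simp [this, hp] <;> omega

theorem pvFilter_strict {α : Type} (l : List α) (p q : α → Bool)
    (himp : ∀ a, q a = true → p a = true) (a : α) (ha : a ∈ l) (hp : p a = true)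
    (hq : q a = false) : (l.filter q).length < (l.filter p).length := by
  induction l with
  | nil => simp at ha
  | cons x xs ih =>
    rcases List.mem_cons.mp ha with rfl | hmem
    · have hmono := pvFilter_length_mono xs p q himp
      simp [hq, hp]
      omega
    · by_cases hqx : q x = true
      · simp [hqx, himp x hqx]
        have := ih hmem; omega
      · have hqx' : q x = false := by simpa using hqx
        by_cases hpx : p x = true
        · simp [hqx', hpx]
          have := ih hmem; omega
        · have hpx' : p x = false := by simpa using hpx
          simp [hqx', hpx']
          exact ih hmem

theorem pvUnvis_insert_lt {v : Std.HashMap (Int × Int) (Int × Int)} {t s : Int × Int}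
    (ht : pvInGrid t) (hc : v.contains t = false) : pvUnvis (v.insert t s) < pvUnvis v := by
  unfold pvUnvis
  refine pvFilter_strict pvGrid (fun c => ! v.contains c) (fun c => ! (v.insert t s).contains c)
    ?_ t (pvMem_grid.mpr ht) (by simp [hc]) ?_
  · intro c h
    simp only [Bool.not_eq_true'] at h ⊢
    rw [Std.HashMap.contains_insert] at h
    rcases Bool.or_eq_false_iff.mp h with ⟨_, h2⟩
    exact h2
  · simp [Std.HashMap.contains_insert]

-- multiset of a cons-accumulating fold (the heappush loop)
theorem pvFoldl_cons_multiset {α β : Type} (l : List β) (f : β → α) (fr : List α) :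
    ((l.foldl (fun acc n => f n :: acc) fr : List α) : Multiset α) =
      ((l.map f : List α) : Multiset α) + (fr : Multiset α) := by
  induction l generalizing fr with
  | nil => simp
  | cons x xs ih =>
    simp only [List.foldl_cons, List.map_cons, ih]
    simp only [← Multiset.cons_coe, Multiset.add_cons, Multiset.cons_add]

-- one step of B's outer loop on a nonempty frontier
theorem pvBLoop_step (f : Nat) (frontier : List ((Int × Int) × (Int × Int)))
    (visited : Std.HashMap (Int × Int) (Int × Int)) (d : Int) (barriers : PySem.Set (Int × Int))
    (h : frontier.isEmpty = false) :
    pvBLoop (f + 1) frontier visited d barriers =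
      pvBCont (frontier.mergeSort pvEdgeLe) visited [] d f barriers := by
  simp [pvBLoop, pvBCont, h]

-- THE SIMULATION: from any mid-level state, A's heap loop computes what B computes.
-- pending is the unprocessed (sorted) part of the current level d, nxt the accumulated level
-- d+1, F the multiset of A's heap entries, and the fuel hypotheses make both loops total.
theorem pvSim : ∀ (fB : Nat) (d : Int) (barriers : PySem.Set (Int × Int))
    (pending nxt : List ((Int × Int) × (Int × Int)))
    (visited : Std.HashMap (Int × Int) (Int × Int))
    (F : List (Int × (Int × Int) × (Int × Int))) (fA : Nat),
    (F : Multiset (Int × (Int × Int) × (Int × Int))) =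
      ((pending.map (fun e => (d, e)) : List _) : Multiset _) +
        ((nxt.map (fun e => (d + 1, e)) : List _) : Multiset _) →
    pending.Pairwise (fun a b => pvEdgeKey a < pvEdgeKey b) →
    (∀ e ∈ pending, pvInGrid e.1 ∧ pvInGrid e.2) →
    (∀ e ∈ nxt, pvInGrid e.1 ∧ pvInGrid e.2) →
    nxt.Nodup →
    (∀ e ∈ nxt, visited.contains e.2 = true) →
    fA ≥ 1 + F.length + 5 * pvUnvis visited →
    fB ≥ (if nxt.isEmpty then 1 else 2) + pvUnvis visited →
    pvALoop fA F visited barriers = some (pvBCont pending visited nxt d fB barriers) := by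
  intro fB
  induction fB with
  | zero =>
    intro d barriers pending nxt visited F fA _ _ _ _ _ _ _ hfB
    exfalso; revert hfB; split <;> omega
  | succ fb ihB =>
    intro d barriers pending
    induction pending with
    | nil =>
      intro nxt visited F fA hF hpw hgp hgn hnd hsrc hfA hfB
      by_cases hne : nxt = []
      · subst hne
        have hF0 : F = [] := by
          have : (F : Multiset (Int × (Int × Int) × (Int × Int))) = 0 := by simpa using hF
          simpa using this
        subst hF0
        obtain ⟨f, rfl⟩ : ∃ f, fA = f + 1 := ⟨fA - 1, by omega⟩
        simp [pvALoop, pvHeapPop, pvBCont, pvBInner, pvBLoop]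
      · have hiso : nxt.isEmpty = false := by simpa using hne
        have hperm : (nxt.mergeSort pvEdgeLe).Perm nxt := List.mergeSort_perm nxt pvEdgeLe
        have hB : pvBCont [] visited nxt d (fb + 1) barriers =
            pvBCont (nxt.mergeSort pvEdgeLe) visited [] (d + 1) fb barriers := by
          simp [pvBCont, pvBInner, pvBLoop, hiso]
        rw [hB]
        refine ihB (d + 1) barriers (nxt.mergeSort pvEdgeLe) [] visited F fA
          ?_ ?_ ?_ ?_ ?_ ?_ ?_ ?_
        · rw [hF]
          simp only [List.map_nil, Multiset.coe_nil]
          rw [Multiset.coe_eq_coe.mpr (hperm.map (fun e => ((d + 1 : Int), e))).symm]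
          simp
        · exact pvSorted_pairwise_lt hnd hgn
        · intro e he
          exact hgn e ((List.mergeSort_perm nxt pvEdgeLe).mem_iff.mp he)
        · intro e he; exact absurd he (by simp)
        · exact List.nodup_nil
        · intro e he; exact absurd he (by simp)
        · exact hfA
        · have e1 : (if nxt.isEmpty then 1 else 2) = 2 := by rw [hiso]; rfl
          rw [e1] at hfB
          simp only [List.isEmpty_nil, if_pos]
          omega
    | cons e rest ihInner =>
      obtain ⟨t, s⟩ := e
      intro nxt visited F fA hF hpw hgp hgn hnd hsrc hfA hfB
      have hmemF : ((d, t, s) : Int × (Int × Int) × (Int × Int)) ∈ F := by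
        rw [← Multiset.mem_coe, hF]; simp
      have hFne : F ≠ [] := by rintro rfl; simp at hmemF
      obtain ⟨⟨m, r⟩, hpop⟩ : ∃ mr, pvHeapPop F = some mr := by
        cases hp : pvHeapPop F with
        | none => exact absurd (pvHeapPop_eq_none_iff.mp hp) hFne
        | some mr => exact ⟨mr, rfl⟩
      obtain ⟨hmin, hms, hlen⟩ := pvHeapPop_spec hpop
      have hhead_le : ∀ y ∈ F, pvEntLe (d, t, s) y = true := by
        intro y hy
        have hyF : y ∈ (F : Multiset (Int × (Int × Int) × (Int × Int))) := Multiset.mem_coe.mpr hy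
        rw [hF] at hyF
        rw [Multiset.mem_add, Multiset.mem_coe, Multiset.mem_coe] at hyF
        rcases hyF with hy' | hy'
        · obtain ⟨e', he', rfl⟩ := List.mem_map.mp hy'
          rcases List.mem_cons.mp he' with rfl | he'
          · exact pvEntLe_refl _
          · exact pvKey_lt_entLe (hgp _ (List.mem_cons_self ..)) (hgp _ (List.mem_cons_of_mem _ he'))
              ((List.pairwise_cons.mp hpw).1 e' he') d
        · obtain ⟨e', _, rfl⟩ := List.mem_map.mp hy'
          exact pvEntLe_dlt (by omega) _ _
      have hmmem : m ∈ F := by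
        rw [← Multiset.mem_coe, hms]; simp
      have hm : m = (d, t, s) := pvEntLe_antisymm (hmin _ hmemF) (hhead_le m hmmem)
      subst hm
      have hr : (r : Multiset (Int × (Int × Int) × (Int × Int))) =
          ((rest.map (fun e => (d, e)) : List _) : Multiset _) +
            ((nxt.map (fun e => (d + 1, e)) : List _) : Multiset _) := by
        have hcons : ((d, t, s) : Int × (Int × Int) × (Int × Int)) ::ₘ (r : Multiset _) =
            ((d, t, s) : Int × (Int × Int) × (Int × Int)) ::ₘ
              (((rest.map (fun e => (d, e)) : List _) : Multiset _) +
                ((nxt.map (fun e => (d + 1, e)) : List _) : Multiset _)) := by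
          rw [← hms, hF]
          simp
        exact (Multiset.cons_inj_right _).mp hcons
      obtain ⟨f, rfl⟩ : ∃ f, fA = f + 1 := ⟨fA - 1, by omega⟩
      by_cases hc : visited.contains t = true
      · have hA : pvALoop (f + 1) F visited barriers = pvALoop f r visited barriers := by
          simp [pvALoop, hpop, hc]
        have hB : pvBCont ((t, s) :: rest) visited nxt d (fb + 1) barriers =
            pvBCont rest visited nxt d (fb + 1) barriers := by
          simp [pvBCont, pvBInner, hc]
        rw [hA, hB]
        refine ihInner nxt visited r f hr (List.Pairwise.of_cons hpw)
          (fun e he => hgp e (List.mem_cons_of_mem _ he)) hgn hnd hsrc ?_ hfB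
        have hl : F.length = r.length + 1 := hlen.symm
        omega
      · have hc' : visited.contains t = false := by simpa using hc
        have hgt : pvInGrid t := (hgp _ (List.mem_cons_self ..)).1
        have huv : pvUnvis (visited.insert t s) < pvUnvis visited := pvUnvis_insert_lt hgt hc'
        by_cases ht70 : (t : Int × Int) = ((70 : Int), (70 : Int))
        · subst ht70
          have hA : pvALoop (f + 1) F visited barriers =
              some (some d, some (pvFindPath 6000 (visited.insert ((70 : Int), (70 : Int)) s)
                [((70 : Int), (70 : Int))] ((70 : Int), (70 : Int)))) := by
            simp [pvALoop, hpop, hc']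
          have hB : pvBCont ((((70 : Int), (70 : Int)), s) :: rest) visited nxt d (fb + 1) barriers =
              (some d, some (pvFindPath 6000 (visited.insert ((70 : Int), (70 : Int)) s)
                [((70 : Int), (70 : Int))] ((70 : Int), (70 : Int)))) := by
            simp [pvBCont, pvBInner, hc']
          rw [hA, hB]
        · have hA : pvALoop (f + 1) F visited barriers =
              pvALoop f ((pvNbrs barriers t).foldl (fun fr n => (d + 1, n, t) :: fr) r)
                (visited.insert t s) barriers := by
            simp [pvALoop, hpop, hc', ht70]
          have hB : pvBCont ((t, s) :: rest) visited nxt d (fb + 1) barriers =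
              pvBCont rest (visited.insert t s)
                (nxt ++ (pvNbrs barriers t).map (fun n => (n, t))) d (fb + 1) barriers := by
            simp [pvBCont, pvBInner, hc', ht70]
          rw [hA, hB]
          have hlF' : ((pvNbrs barriers t).foldl (fun fr n => (d + 1, n, t) :: fr) r).length =
              (pvNbrs barriers t).length + r.length := by
            have := congrArg Multiset.card
              (pvFoldl_cons_multiset (pvNbrs barriers t) (fun n => ((d + 1 : Int), n, t)) r)
            simpa using this
          refine ihInner (nxt ++ (pvNbrs barriers t).map (fun n => (n, t)))
            (visited.insert t s) _ f ?_ (List.Pairwise.of_cons hpw)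
            (fun e he => hgp e (List.mem_cons_of_mem _ he)) ?_ ?_ ?_ ?_ ?_
          · rw [pvFoldl_cons_multiset, hr]
            simp [List.map_append, List.map_map, Function.comp_def, add_comm]
          · intro e he
            rcases List.mem_append.mp he with he | he
            · exact hgn e he
            · obtain ⟨n, hn, rfl⟩ := List.mem_map.mp he
              exact ⟨pvNbrs_mem_grid hn, hgt⟩
          · refine hnd.append ((pvNbrs_nodup barriers t).map ?_) ?_
            · intro a b hab; simpa [Prod.ext_iff] using hab
            · intro a ha hb
              obtain ⟨n, _, rfl⟩ := List.mem_map.mp hb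
              have := hsrc _ ha
              simp only at this
              rw [this] at hc'
              exact absurd hc' (by simp)
          · intro e he
            rcases List.mem_append.mp he with he | he
            · rw [Std.HashMap.contains_insert]
              simp [hsrc e he]
            · obtain ⟨n, _, rfl⟩ := List.mem_map.mp he
              simp [Std.HashMap.contains_insert]
          · have hnl : (pvNbrs barriers t).length ≤ 4 := pvNbrs_length_le barriers t
            have hl : F.length = r.length + 1 := hlen.symm
            rw [hlF']
            omega
          · have e1 : (1 : Nat) ≤ (if nxt.isEmpty then 1 else 2) := by split <;> omega
            have e2 : (if (nxt ++ (pvNbrs barriers t).map (fun n => (n, t))).isEmpty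
                then 1 else 2) ≤ 2 := by split <;> omega
            omega

-- ===== VERDICT (by name: the statement is the Claim_ definition above) =====
theorem run_dijkstras_spec : Claim_equal_run_dijkstras := by
  intro bytes blocks_fallen _
  unfold Spec_run_dijkstras
  simp only [run_dijkstras, run_dijkstras_alt]
  have hu := pvUnvis_le ((Std.HashMap.emptyWithCapacity : Std.HashMap (Int × Int) (Int × Int)) : Std.HashMap (Int × Int) (Int × Int))
  have hsim := pvSim 5999 0 (PySem.Set.ofList (PySem.List.slice bytes none (some blocks_fallen)))
      [(((0 : Int), (0 : Int)), ((0 : Int), (0 : Int)))] [] (Std.HashMap.emptyWithCapacity : Std.HashMap (Int × Int) (Int × Int))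
      [((0 : Int), ((0 : Int), (0 : Int)), ((0 : Int), (0 : Int)))] 100000
      (by simp) (by simp) ?_ (fun e he => absurd he (by simp)) List.nodup_nil
      (fun e he => absurd he (by simp)) (by have := hu; simp only [List.length_cons, List.length_nil]; omega)
      (by have := hu; simp; omega)
  · rw [hsim]
    simp only [Option.getD_some]
    have hs : ([(((0 : Int), (0 : Int)), ((0 : Int), (0 : Int)))].mergeSort pvEdgeLe) =
        [(((0 : Int), (0 : Int)), ((0 : Int), (0 : Int)))] := by simp
    rw [show (6000 : Nat) = 5999 + 1 from rfl, pvBLoop_step _ _ _ _ _ (by simp), hs]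
  · intro e he
    simp only [List.mem_singleton] at he
    subst he
    exact ⟨by simp [pvInGrid], by simp [pvInGrid]⟩
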